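-- pv_equiv track=rewrite | github.com/meena98/pythoncode | mocktest1_probem3.py | from_custom_base5
-- ===== SOURCE A (Python) =====
-- def from_custom_base5(s):
--     if type(s)!=str:
--         raise TypeError
--     d = {"a":"0","e": "1","i":"2","o":"3","u":"4"}
--     number=""
--     result=0
--     for temp in s:
--         if temp in d:
--             number=number+d[temp]
--     n=int(number)
--     digit = 0
--     while n!=0:
--         rem=n%10
--         result+=rem*(5**digit)
--         n=n//10
--         digit+=1
--     return result
--     pass
-- ===== SOURCE B (Python) =====
-- def from_custom_base5(s):
--     if type(s) != str:
--         raise TypeError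
--     vowels = "aeiou"
--     digits = [vowels.index(c) for c in s if c in vowels]
--     if not digits:
--         raise ValueError("no vowel digits in input")
--     result = 0
--     for v in digits:
--         result = result * 5 + v
--     return result
-- ===== Notes on version B (the rewrite author's own statement) =====
-- stated objective: simpler
-- what changed: A builds a digit string, re-parses it with int() (quadratic in the number of digits), then reconstructs the value in a while loop peeling decimal digits off positionally; B maps vowels to digit values directly and accumulates the base-5 value in one Horner fold, with no intermediate string or re-parsing.
import Mathlib
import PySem

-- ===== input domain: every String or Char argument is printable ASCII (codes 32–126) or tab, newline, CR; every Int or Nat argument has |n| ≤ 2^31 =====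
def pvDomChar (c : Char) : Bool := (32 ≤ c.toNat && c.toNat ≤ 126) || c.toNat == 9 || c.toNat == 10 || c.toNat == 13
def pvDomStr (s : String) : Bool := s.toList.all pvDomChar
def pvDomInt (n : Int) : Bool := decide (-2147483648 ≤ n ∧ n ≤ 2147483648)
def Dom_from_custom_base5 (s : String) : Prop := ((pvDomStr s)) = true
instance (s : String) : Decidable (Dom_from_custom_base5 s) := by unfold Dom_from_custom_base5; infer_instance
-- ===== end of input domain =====

-- B replaces A's decode-via-decimal-reparsing (build a digit string, int() it, then a while
-- loop peeling decimal digits back off) with a single Horner fold over the vowel digit values.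


-- ===== PORT A =====
-- d = {"a":"0","e":"1","i":"2","o":"3","u":"4"} (1-char strings modelled as Char)
def dA : PySem.Dict Char Char :=
  PySem.Dict.ofList [('a', '0'), ('e', '1'), ('i', '2'), ('o', '3'), ('u', '4')]

-- the 'while n != 0' loop; n here is always ≥ 0 (int of a string of decimal digits), where
-- the guard '0 < n' is exact ('n ≠ 0' would not terminate for negative n in Python either)
def loopA (n : Int) (digit : Nat) (result : Int) : Int :=
  if h : 0 < n then
    loopA (PySem.Int.floordiv n 10) (digit + 1) (result + PySem.Int.mod n 10 * 5 ^ digit)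
  else result
termination_by n.toNat
decreasing_by
  rw [PySem.Int.floordiv_eq_ediv_of_pos (by norm_num)]
  omega

def from_custom_base5 (s : String) : Int :=
  -- for temp in s: if temp in d: number = number + d[temp]
  -- (d[temp] is guarded by 'temp in d', so getD with a dummy default is exact here)
  let number : List Char :=
    s.toList.foldl
      (fun acc c => if PySem.Dict.contains dA c then acc ++ [PySem.Dict.getD dA c ' '] else acc) []
  match PySem.Int.ofChars? number with
  | none => 0          -- int("") raises ValueError: excluded by Pre_
  | some n => loopA n 0 0

-- ===== PORT B =====
def vowelsB : List Char := ['a', 'e', 'i', 'o', 'u']   -- "aeiou" ('c in vowels' for a 1-char c)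

def from_custom_base5_alt (s : String) : Int :=
  -- digits = [vowels.index(c) for c in s if c in vowels]
  -- (index is only evaluated on members, so getD 0 on index? is exact here)
  let digits : List Int :=
    (s.toList.filter (fun c => vowelsB.contains c)).map
      (fun c => (((PySem.List.index? vowelsB c).getD 0 : Nat) : Int))
  if digits = [] then 0          -- raise ValueError: excluded by Pre_
  else digits.foldl (fun r v => r * 5 + v) 0

-- ===== PRECONDITION & SPEC =====
-- Pre_ excludes exactly the strings with no vowel, on which both A and B raise ValueError.
def Pre_from_custom_base5 (s : String) : Prop :=
  s.toList.any (fun c => vowelsB.contains c) = true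
instance (s : String) : Decidable (Pre_from_custom_base5 s) := by
  unfold Pre_from_custom_base5; infer_instance

def pvWitness_from_custom_base5 : String := "aeiou"

def Spec_from_custom_base5 (s : String) (out : Int) : Prop := out = from_custom_base5_alt s
instance (s : String) (out : Int) : Decidable (Spec_from_custom_base5 s out) := by
  unfold Spec_from_custom_base5; infer_instance

-- ===== CLAIM (what is proved, stated in full; the proofs are below) =====
def Claim_equal_from_custom_base5 : Prop :=
  ∀ (s : String), Dom_from_custom_base5 s → Pre_from_custom_base5 s →
    Spec_from_custom_base5 s (from_custom_base5 s)

-- ===== LEMMAS AND PROOFS =====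

-- the base-5 digit value of a vowel, exactly as B's port computes it
def nval (c : Char) : Nat := (PySem.List.index? vowelsB c).getD 0

-- base-10 / base-5 values of a list of digit values
def nv10 (l : List Nat) : Nat := l.foldl (fun a d => a * 10 + d) 0
def v5 (l : List Nat) : Nat := l.foldl (fun a d => a * 5 + d) 0

-- int(es) for a nonempty string of decimal digits (Python's int: possible sign, whitespace
-- and underscores are all absent here); the parser's private digit loop is captured as G
lemma parse_digits (es : List Char) (hne : es ≠ []) (hd : ∀ c ∈ es, c.isDigit) :
    PySem.Int.ofChars? es =
      some ((es.foldl (fun a c => a * 10 + (c.toNat - 48)) 0 : Nat) : Int) := by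
  obtain ⟨G, hG, h0, h1⟩ :
      ∃ G : List Char → Bool → Nat → Option Nat,
      (PySem.Int.ofChars? = fun s =>
        have cs := (List.dropWhile PySem.Int.isIntSpace
            (List.dropWhile PySem.Int.isIntSpace s).reverse).reverse
        match cs with
        | '-' :: ds => Option.map (fun n => -n)
            (do let a ← (match ds with | [] => none | es => G es false 0); pure ((a : Nat) : Int))
        | '+' :: ds => Option.map (fun n => n)
            (do let a ← (match ds with | [] => none | es => G es false 0); pure ((a : Nat) : Int))
        | ds => Option.map (fun n => n)
            (do let a ← (match ds with | [] => none | es => G es false 0); pure ((a : Nat) : Int))) ∧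
      (∀ aft acc, G [] aft acc = if aft then some acc else none) ∧
      (∀ c rest aft acc, G (c :: rest) aft acc =
        if c.isDigit then G rest true (acc * 10 + (c.toNat - '0'.toNat))
        else if c = '_' ∧ aft = true then
          (match rest with | d :: _ => if d.isDigit then G rest false acc else none | [] => none)
        else none) :=
    ⟨_, rfl, fun _ _ => rfl, fun _ _ _ _ => rfl⟩
  have hGo : ∀ (l : List Char) (aft : Bool) (acc : Nat), l ≠ [] → (∀ c ∈ l, c.isDigit) →
      G l aft acc = some (l.foldl (fun a c => a * 10 + (c.toNat - 48)) acc) := by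
    intro l
    induction l with
    | nil => intro _ _ h _; exact absurd rfl h
    | cons c rest ih =>
      intro aft acc _ hdig
      rw [h1]
      rw [if_pos (hdig c (List.mem_cons_self))]
      rcases rest with _ | ⟨c2, r2⟩
      · rw [h0]; rfl
      · rw [ih true _ (by simp) (fun x hx => hdig x (List.mem_cons_of_mem _ hx))]
        rfl
  have hnospace : ∀ c ∈ es, PySem.Int.isIntSpace c = false := by
    intro c hc
    have := hd c hc
    simp [Char.isDigit] at this
    simp [PySem.Int.isIntSpace]
    constructor
    · constructor
      · constructor
        · constructor
          · constructor <;> (intro h; subst h; simp_all)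
          · intro h; subst h; simp_all
        · intro h; subst h; simp_all
      · intro h; subst h; simp_all
    · intro h; subst h; simp_all
  have hdw1 : List.dropWhile PySem.Int.isIntSpace es = es := by
    rw [List.dropWhile_eq_self_iff]
    intro hl
    simp [hnospace _ (List.getElem_mem hl)]
  have hdw2 : List.dropWhile PySem.Int.isIntSpace es.reverse = es.reverse := by
    rw [List.dropWhile_eq_self_iff]
    intro hl
    have hm : es.reverse[0] ∈ es := List.mem_reverse.mp (List.getElem_mem hl)
    intro hcontra
    rw [hnospace _ hm] at hcontra
    exact Bool.false_ne_true hcontra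
  rw [hG]
  simp only [hdw1, hdw2, List.reverse_reverse]
  rcases es with _ | ⟨c, rest⟩
  · exact absurd rfl hne
  have hc := hd c List.mem_cons_self
  split
  · next ds heq =>
    exfalso
    have : c = '-' := by injection heq
    subst this; simp [Char.isDigit] at hc
  · next ds heq =>
    exfalso
    have : c = '+' := by injection heq
    subst this; simp [Char.isDigit] at hc
  · split
    · next heq => exact absurd heq (by simp)
    · rw [hGo (c :: rest) false 0 (by simp) hd]
      rfl

lemma v5_of_nv10_zero (l : List Nat) (h : nv10 l = 0) : v5 l = 0 := by
  induction l using List.reverseRecOn with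
  | nil => rfl
  | append_singleton t d ih =>
    rw [nv10, List.foldl_append] at h
    rw [v5, List.foldl_append]
    simp only [List.foldl_cons, List.foldl_nil] at h ⊢
    have h1 : nv10 t = 0 ∧ d = 0 := by rw [nv10]; omega
    rw [show t.foldl (fun a d => a * 5 + d) 0 = v5 t from rfl, ih (by rw [nv10]; exact h1.1), h1.2]

-- A's while loop re-reads the decimal digits of nv10 l as base-5 positions
lemma loopA_eq (l : List Nat) (hl : ∀ d ∈ l, d < 10) (digit : Nat) (r : Int) :
    loopA ((nv10 l : Nat) : Int) digit r = r + ((v5 l : Nat) : Int) * 5 ^ digit := by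
  induction l using List.reverseRecOn generalizing digit r with
  | nil =>
    rw [loopA]
    simp [nv10, v5]
  | append_singleton t d ih =>
    have hd : d < 10 := hl d (by simp)
    have hnv : nv10 (t ++ [d]) = nv10 t * 10 + d := by
      rw [nv10, nv10, List.foldl_append]; rfl
    have hv5 : v5 (t ++ [d]) = v5 t * 5 + d := by
      rw [v5, v5, List.foldl_append]; rfl
    by_cases hz : nv10 t * 10 + d = 0
    · have h1 : nv10 t = 0 ∧ d = 0 := by omega
      rw [hnv, hz, loopA]
      rw [hv5, v5_of_nv10_zero t h1.1, h1.2]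
      simp
    · rw [hnv, loopA]
      rw [dif_pos (by exact_mod_cast Nat.pos_of_ne_zero hz)]
      rw [PySem.Int.floordiv_eq_ediv_of_pos (by norm_num),
          PySem.Int.mod_eq_emod_of_pos (by norm_num)]
      have e1 : ((nv10 t * 10 + d : Nat) : Int) / 10 = ((nv10 t : Nat) : Int) := by
        push_cast; omega
      have e2 : ((nv10 t * 10 + d : Nat) : Int) % 10 = ((d : Nat) : Int) := by
        push_cast; omega
      rw [e1, e2, ih (fun x hx => hl x (by simp [hx]))]
      rw [hv5]
      push_cast
      ring

-- A's dict membership test agrees with B's vowel-list membership test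
lemma contains_dA (c : Char) : PySem.Dict.contains dA c = vowelsB.contains c := by
  have h : dA = PySem.Dict.mk [('a', '0'), ('e', '1'), ('i', '2'), ('o', '3'), ('u', '4')] := by
    decide
  rw [h, PySem.Dict.contains_mk]
  simp only [vowelsB, List.contains_cons, List.contains_nil, Bool.or_false]
  simp [Bool.beq_comm]

-- facts about vowels, by the five cases
lemma vowel_facts (c : Char) (hc : c ∈ vowelsB) :
    (PySem.Dict.getD dA c ' ').isDigit = true ∧
    (PySem.Dict.getD dA c ' ').toNat - 48 = nval c ∧ nval c < 10 := by
  simp only [vowelsB, List.mem_cons, List.not_mem_nil, or_false] at hc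
  rcases hc with h | h | h | h | h <;> subst h <;> refine ⟨by decide, by decide, by decide⟩

-- B's Int Horner fold is the Nat Horner fold, cast
lemma bfold (l : List Char) (a : Nat) :
    (l.map (fun c => (((PySem.List.index? vowelsB c).getD 0 : Nat) : Int))).foldl
        (fun r v => r * 5 + v) ((a : Nat) : Int) =
      ((l.foldl (fun r c => r * 5 + nval c) a : Nat) : Int) := by
  induction l generalizing a with
  | nil => rfl
  | cons c t ih =>
    simp only [List.map_cons, List.foldl_cons]
    have : ((a : Nat) : Int) * 5 + (((PySem.List.index? vowelsB c).getD 0 : Nat) : Int) =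
        (((a * 5 + nval c : Nat) : Nat) : Int) := by
      rw [nval]; push_cast; ring
    rw [this, ih]

-- ===== VERDICT (by name: the statement is the Claim_ definition above) =====
theorem from_custom_base5_spec : Claim_equal_from_custom_base5 := by
  intro s _ hpre
  unfold Spec_from_custom_base5 from_custom_base5 from_custom_base5_alt
  simp only []
  rw [PySem.List.foldl_append_if (fun c => PySem.Dict.contains dA c)
      (fun c => PySem.Dict.getD dA c ' ') s.toList []]
  simp only [List.nil_append]
  have hpred : (fun c => PySem.Dict.contains dA c) = (fun c => vowelsB.contains c) := by
    funext c; exact contains_dA c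
  rw [hpred]
  set t := s.toList.filter (fun c => vowelsB.contains c) with ht
  have htv : ∀ c ∈ t, c ∈ vowelsB := by
    intro c hc
    have := List.of_mem_filter hc
    simpa using this
  have htne : t ≠ [] := by
    unfold Pre_from_custom_base5 at hpre
    rw [List.any_eq_true] at hpre
    obtain ⟨c, hcs, hcv⟩ := hpre
    intro h
    have : c ∈ t := by rw [ht]; exact List.mem_filter.mpr ⟨hcs, hcv⟩
    rw [h] at this; exact List.not_mem_nil this
  have hmapne : t.map (fun c => PySem.Dict.getD dA c ' ') ≠ [] := by
    simpa using htne
  rw [parse_digits _ hmapne (by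
    intro c hc
    obtain ⟨x, hx, rfl⟩ := List.mem_map.mp hc
    exact (vowel_facts x (htv x hx)).1)]
  simp only []
  rw [List.foldl_map]
  rw [PySem.List.foldl_congr_mem t
      (fun (a : Nat) c => a * 10 + ((PySem.Dict.getD dA c ' ').toNat - 48))
      (fun (a : Nat) c => a * 10 + nval c) 0
      (fun acc x hx => by simp only []; rw [(vowel_facts x (htv x hx)).2.1])]
  have hnv : t.foldl (fun (a : Nat) c => a * 10 + nval c) 0 = nv10 (t.map nval) := by
    rw [nv10, List.foldl_map]
  rw [hnv, loopA_eq (t.map nval)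
      (by intro d hd; obtain ⟨x, hx, rfl⟩ := List.mem_map.mp hd
          exact (vowel_facts x (htv x hx)).2.2)]
  rw [if_neg (by simpa using htne)]
  have := bfold t 0
  simp only [Nat.cast_zero] at this
  rw [this]
  have hv : t.foldl (fun r c => r * 5 + nval c) 0 = v5 (t.map nval) := by
    rw [v5, List.foldl_map]
  rw [hv]
  simp
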